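-- pv_equiv track=rewrite | github.com/agustina-velazquez/primer-parcial | paquete/ejercicio.py | sumar_filas_columnas
-- ===== SOURCE A (Python) =====
-- def sumar_filas_columnas(matriz:list, lugar:str)->list:
--     '''Recibe una matriz y un lugar como parámetros y retorna una lista con la suma de cda fila o cada columna
--     '''
--     lista_suma = []
--     suma = 0
--
--     if lugar == "Fila":
--         for i in range(len(matriz)):
--             suma = 0
--             for j in range(len(matriz[i])):
--                 suma += matriz[i][j]
--             lista_suma += [suma]
--
--     else:
--         columnas = len(matriz[0])
--         for i in range(columnas): #5 iter
--             suma = 0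
--             for j in range(len(matriz)): #4 iter
--                 suma += matriz[j][i]
--             lista_suma += [suma]
--
--     return lista_suma
-- ===== SOURCE B (Python) =====
-- def sumar_filas_columnas(matriz: list, lugar: str) -> list:
--     '''Suma de cada fila (recursivo) o de cada columna (acumulando en un dict).'''
--     if lugar == "Fila":
--         return _sumas_filas(matriz)
--     acc = {}
--     for fila in matriz:
--         for i, v in enumerate(fila):
--             acc[i] = acc.get(i, 0) + v
--     return [acc.get(i, 0) for i in range(len(matriz[0]))]
--
-- def _sumas_filas(matriz):
--     if not matriz:
--         return []
--     return [_suma_fila(matriz[0])] + _sumas_filas(matriz[1:])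
--
-- def _suma_fila(fila):
--     if not fila:
--         return 0
--     return fila[0] + _suma_fila(fila[1:])
-- ===== Notes on version B (the rewrite author's own statement) =====
-- stated objective: alternative
-- what changed: Row branch is computed by structural recursion on the matrix instead of index loops; column branch accumulates entries into a dict keyed by column index while enumerating each row once, then reads the dict out over range(ncols), instead of A's repeated per-column index scans.
import Mathlib
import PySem

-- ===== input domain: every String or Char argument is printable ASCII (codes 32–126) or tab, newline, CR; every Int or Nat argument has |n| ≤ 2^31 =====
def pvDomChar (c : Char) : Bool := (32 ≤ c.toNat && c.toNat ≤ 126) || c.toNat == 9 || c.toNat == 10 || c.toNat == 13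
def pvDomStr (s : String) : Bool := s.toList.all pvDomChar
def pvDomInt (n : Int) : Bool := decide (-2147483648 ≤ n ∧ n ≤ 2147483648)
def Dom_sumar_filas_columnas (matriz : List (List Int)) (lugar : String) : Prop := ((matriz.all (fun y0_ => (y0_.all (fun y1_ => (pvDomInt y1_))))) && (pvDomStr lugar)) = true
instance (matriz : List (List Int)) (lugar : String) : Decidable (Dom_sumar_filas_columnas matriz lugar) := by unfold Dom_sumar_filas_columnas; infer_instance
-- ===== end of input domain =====

-- B: row branch by structural recursion over the matrix; column branch accumulates
-- into a dict keyed by column index and reads it out over range(ncols) (objective: alternative).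


-- ===== PORT A =====
def sumar_filas_columnas (matriz : List (List Int)) (lugar : String) : List Int :=
  if lugar = "Fila" then
    (PySem.List.pyRange 0 (matriz.length : Int) 1).foldl (fun lista_suma i =>
      let fila := PySem.List.pyGetD matriz i []
      let suma := (PySem.List.pyRange 0 (fila.length : Int) 1).foldl
        (fun suma j => suma + PySem.List.pyGetD fila j 0) 0
      lista_suma ++ [suma]) []
  else
    let columnas := (PySem.List.pyGetD matriz 0 []).length
    (PySem.List.pyRange 0 (columnas : Int) 1).foldl (fun lista_suma i =>
      let suma := (PySem.List.pyRange 0 (matriz.length : Int) 1).foldl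
        (fun suma j => suma + PySem.List.pyGetD (PySem.List.pyGetD matriz j []) i 0) 0
      lista_suma ++ [suma]) []

-- ===== PORT B =====
-- _suma_fila: recursion on the row
def pvSumaFila : List Int → Int
  | [] => 0
  | x :: xs => x + pvSumaFila xs

-- _sumas_filas: recursion on the list of rows
def pvSumasFilas : List (List Int) → List Int
  | [] => []
  | f :: rest => [pvSumaFila f] ++ pvSumasFilas rest

def sumar_filas_columnas_alt (matriz : List (List Int)) (lugar : String) : List Int :=
  if lugar = "Fila" then
    pvSumasFilas matriz
  else
    let acc : PySem.Dict Int Int := matriz.foldl (fun acc fila =>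
      (PySem.List.enumerate fila 0).foldl
        (fun acc p => acc.modify p.1 0 (· + p.2)) acc) PySem.Dict.empty
    (PySem.List.pyRange 0 (((PySem.List.pyGetD matriz 0 ([] : List Int)).length : Int)) 1).map
      (fun i => acc.getD i 0)

-- ===== PRECONDITION & SPEC =====
-- Pre_ excludes exactly the inputs where Python A raises IndexError: the non-"Fila"
-- branch with an empty matrix (matriz[0]) or a row shorter than the first row.
def Pre_sumar_filas_columnas (matriz : List (List Int)) (lugar : String) : Prop :=
  lugar = "Fila" ∨ (matriz ≠ [] ∧ ∀ fila ∈ matriz, (matriz.headD []).length ≤ fila.length)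
instance (matriz : List (List Int)) (lugar : String) : Decidable (Pre_sumar_filas_columnas matriz lugar) := by unfold Pre_sumar_filas_columnas; infer_instance
def pvWitness_sumar_filas_columnas : List (List Int) × String := ([[1, 2], [3, 4]], "Columna")

def Spec_sumar_filas_columnas (matriz : List (List Int)) (lugar : String) (out : List Int) : Prop := out = sumar_filas_columnas_alt matriz lugar
instance (matriz : List (List Int)) (lugar : String) (out : List Int) : Decidable (Spec_sumar_filas_columnas matriz lugar out) := by unfold Spec_sumar_filas_columnas; infer_instance

-- ===== CLAIM (what is proved, stated in full; the proofs are below) =====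
def Claim_equal_sumar_filas_columnas : Prop := ∀ (matriz : List (List Int)) (lugar : String), Dom_sumar_filas_columnas matriz lugar → Pre_sumar_filas_columnas matriz lugar → Spec_sumar_filas_columnas matriz lugar (sumar_filas_columnas matriz lugar)

-- ===== LEMMAS AND PROOFS =====

-- column i's contribution of one row enumerated from start s
def pvContrib (fila : List Int) (s q : Int) : Int :=
  if 0 ≤ q - s then fila.getD (q - s).toNat 0 else 0

theorem pv_row_fold (fila : List Int) : ∀ (s : Int) (d : PySem.Dict Int Int) (q : Int),
    ((PySem.List.enumerate fila s).foldl (fun d p => d.modify p.1 0 (· + p.2)) d).getD q 0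
      = d.getD q 0 + pvContrib fila s q := by
  induction fila with
  | nil => intro s d q; simp [PySem.List.enumerate_nil, pvContrib]
  | cons x xs ih =>
    intro s d q
    rw [PySem.List.enumerate_cons, List.foldl_cons, ih (s+1)]
    rw [PySem.Dict.getD_modify]
    by_cases h : q = s
    · subst h
      have h1 : pvContrib (x :: xs) q q = x := by simp [pvContrib]
      have h2 : pvContrib xs (q+1) q = 0 := by
        simp only [pvContrib]; rw [if_neg (by omega)]
      rw [if_pos rfl, h1, h2]; ring
    · rw [if_neg h]
      congr 1
      simp only [pvContrib]
      by_cases hs : 0 ≤ q - s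
      · have hs' : 0 < q - s := by omega
        rw [if_pos hs, if_pos (by omega)]
        have : (q - s).toNat = (q - (s+1)).toNat + 1 := by omega
        rw [this]; simp [List.getD]
      · rw [if_neg hs, if_neg (by omega)]

-- sum of column q over a list of rows (missing entries read as 0)
def pvColSum (rows : List (List Int)) (q : Int) : Int :=
  (rows.map (fun r => pvContrib r 0 q)).sum

theorem pv_col_fold (rows : List (List Int)) : ∀ (d : PySem.Dict Int Int) (q : Int),
    (rows.foldl (fun acc fila =>
        (PySem.List.enumerate fila 0).foldl (fun acc p => acc.modify p.1 0 (· + p.2)) acc) d).getD q 0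
      = d.getD q 0 + pvColSum rows q := by
  induction rows with
  | nil => intro d q; simp [pvColSum]
  | cons r rs ih =>
    intro d q
    rw [List.foldl_cons, ih, pv_row_fold]
    simp [pvColSum, add_assoc]

-- A's inner row loop is the row's sum
theorem pv_row (fila : List Int) :
    (PySem.List.pyRange 0 (fila.length : Int) 1).foldl
      (fun suma j => suma + PySem.List.pyGetD fila j 0) 0 = fila.sum := by
  rw [PySem.List.foldl_pyRange_zero_pyGetD' fila 0 (fun s x => s + x) 0]
  rw [List.sum_eq_foldl]

theorem pv_sumaFila (f : List Int) : pvSumaFila f = f.sum := by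
  induction f with
  | nil => simp [pvSumaFila]
  | cons x xs ih => simp [pvSumaFila, ih]

theorem pv_sumasFilas (m : List (List Int)) : pvSumasFilas m = m.map List.sum := by
  induction m with
  | nil => simp [pvSumasFilas]
  | cons f rest ih => simp [pvSumasFilas, pv_sumaFila, ih]

theorem pv_contrib_nonneg (r : List Int) (i : Int) (h : 0 ≤ i) :
    pvContrib r 0 i = PySem.List.pyGetD r i 0 := by
  have : i = ((i.toNat : Nat) : Int) := by omega
  rw [this, PySem.List.pyGetD_natCast]
  simp only [pvContrib, sub_zero, List.getD]
  congr 1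

theorem sumar_filas_columnas_spec : Claim_equal_sumar_filas_columnas := by
  intro matriz lugar _ _
  unfold Spec_sumar_filas_columnas sumar_filas_columnas sumar_filas_columnas_alt
  by_cases hf : lugar = "Fila"
  · simp only [hf, if_pos]
    rw [PySem.List.foldl_append_singleton_eq_map
      (fun i => (PySem.List.pyRange 0 ((PySem.List.pyGetD matriz i ([]:List Int)).length : Int) 1).foldl
        (fun suma j => suma + PySem.List.pyGetD (PySem.List.pyGetD matriz i ([]:List Int)) j 0) 0)]
    simp only [List.nil_append, pv_row]
    rw [pv_sumasFilas]
    rw [show (fun i => (PySem.List.pyGetD matriz i ([]:List Int)).sum)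
        = (List.sum ∘ fun i => PySem.List.pyGetD matriz i ([]:List Int)) from rfl,
      ← List.map_map, PySem.List.map_pyGetD_pyRange_zero']
  · simp only [hf, ite_false]
    rw [PySem.List.foldl_append_singleton_eq_map
      (fun i => (PySem.List.pyRange 0 (matriz.length : Int) 1).foldl
        (fun suma j => suma + PySem.List.pyGetD (PySem.List.pyGetD matriz j ([]:List Int)) i 0) 0)]
    rw [List.nil_append]
    have hB : ∀ q : Int,
        ((matriz.foldl (fun acc fila =>
            (PySem.List.enumerate fila 0).foldl (fun acc p => acc.modify p.1 0 (· + p.2)) acc)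
          PySem.Dict.empty).getD q 0) = pvColSum matriz q := by
      intro q; rw [pv_col_fold]; simp
    simp only [hB]
    apply List.map_congr_left
    intro i hi
    have hi0 : 0 ≤ i := (PySem.List.mem_pyRange_one.mp hi).1
    simp only [PySem.List.foldl_add, zero_add]
    rw [show (fun x => PySem.List.pyGetD (PySem.List.pyGetD matriz x ([]:List Int)) i 0)
        = ((fun r : List Int => PySem.List.pyGetD r i 0) ∘ fun x => PySem.List.pyGetD matriz x []) from rfl,
      ← List.map_map, PySem.List.map_pyGetD_pyRange_zero']
    simp only [pvColSum]
    congr 1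
    apply List.map_congr_left
    intro r _
    rw [pv_contrib_nonneg r i hi0]
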